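-- pv_equiv track=rewrite | github.com/pangolin16/allcode | Work/files/cors_proxy.py | filter_driver_license
-- ===== SOURCE A (Python) =====
-- def filter_driver_license(jobs):
--     """
--     Filter out jobs that require a driver's license
--     Checks for common Czech terms related to driving requirements
--     """
--     driver_keywords = [
--         'řidič', 'ridic', 'řidičský průkaz', 'ridicsky prukaz', 'řp',
--         'vozidlo', 'auto', 'doprava', 'řízení', 'řidičák', 'ridicak',
--         'kategorie', 'c+e', 'c e', 'b+e', 'driving', 'driver', 'license',
--         'vzv', 'vysokozdvižný vozík', 'vysokozdvizny vozik'
--     ]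
--
--     filtered_jobs = []
--     for job in jobs:
--         # Check title and description for driver-related keywords
--         title_lower = job.get('pozice', job.get('title', '')).lower()
--         description_lower = job.get('popis', job.get('description', '')).lower()
--
--         # Skip if any driver keyword is found
--         has_driver_requirement = False
--         for keyword in driver_keywords:
--             if keyword in title_lower or keyword in description_lower:
--                 has_driver_requirement = True
--                 break
--
--         if not has_driver_requirement:
--             filtered_jobs.append(job)
--
--     return filtered_jobs
-- ===== SOURCE B (Python) =====
-- import re
--
-- DRIVER_KEYWORDS = [
--     'řidič', 'ridic', 'řidičský průkaz', 'ridicsky prukaz', 'řp',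
--     'vozidlo', 'auto', 'doprava', 'řízení', 'řidičák', 'ridicak',
--     'kategorie', 'c+e', 'c e', 'b+e', 'driving', 'driver', 'license',
--     'vzv', 'vysokozdvižný vozík', 'vysokozdvizny vozik'
-- ]
--
-- _DRIVER_PATTERN = re.compile('|'.join(map(re.escape, DRIVER_KEYWORDS)))
--
--
-- def filter_driver_license(jobs):
--     """Keep only jobs whose title/description mention no driving-related keyword."""
--     return [
--         job for job in jobs
--         if not (_DRIVER_PATTERN.search(job.get('pozice', job.get('title', '')).lower())
--                 or _DRIVER_PATTERN.search(job.get('popis', job.get('description', '')).lower()))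
--     ]
-- ===== Notes on version B (the rewrite author's own statement) =====
-- stated objective: idiomatic
-- what changed: Replaces A's per-job inner loop over 21 keywords (with a flag and break) by one regex compiled once from the escaped keyword list, so each text is decided by a single pattern.search, and builds the result with a filter comprehension instead of an accumulator loop.
import Mathlib
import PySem

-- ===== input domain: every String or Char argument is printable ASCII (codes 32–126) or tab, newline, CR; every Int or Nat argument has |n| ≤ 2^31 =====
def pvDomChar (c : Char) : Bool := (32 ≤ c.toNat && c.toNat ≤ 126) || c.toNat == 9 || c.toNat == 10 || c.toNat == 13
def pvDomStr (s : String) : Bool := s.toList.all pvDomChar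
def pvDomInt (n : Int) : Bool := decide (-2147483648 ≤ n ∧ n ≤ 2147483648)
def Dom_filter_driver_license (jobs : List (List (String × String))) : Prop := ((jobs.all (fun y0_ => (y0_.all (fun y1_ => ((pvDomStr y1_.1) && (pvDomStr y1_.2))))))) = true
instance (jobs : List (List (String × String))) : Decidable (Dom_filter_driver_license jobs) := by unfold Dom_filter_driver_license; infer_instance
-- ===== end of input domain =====

-- B compiles the keyword list into one regex alternation of escaped literals and decides each
-- text by a single pattern.search, filtering with a comprehension; objective: idiomatic.


-- ===== PORT A =====
def driverKeywords : List String :=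
  ["řidič", "ridic", "řidičský průkaz", "ridicsky prukaz", "řp",
   "vozidlo", "auto", "doprava", "řízení", "řidičák", "ridicak",
   "kategorie", "c+e", "c e", "b+e", "driving", "driver", "license",
   "vzv", "vysokozdvižný vozík", "vysokozdvizny vozik"]

def filter_driver_license (jobs : List (List (String × String))) : List (List (String × String)) :=
  jobs.foldl (fun filtered_jobs job =>
    let d := PySem.Dict.mk job
    let title_lower := PySem.Str.lower (PySem.Dict.getD d "pozice" (PySem.Dict.getD d "title" ""))
    let description_lower := PySem.Str.lower (PySem.Dict.getD d "popis" (PySem.Dict.getD d "description" ""))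
    -- inner keyword loop with break: once the flag is true it stays true
    let has_driver_requirement := driverKeywords.foldl
      (fun has keyword => has || (PySem.Str.isIn keyword title_lower || PySem.Str.isIn keyword description_lower)) false
    if !has_driver_requirement then filtered_jobs ++ [job] else filtered_jobs) []

-- ===== PORT B =====
-- _DRIVER_PATTERN.search on an alternation of re.escape'd literals: a match exists iff at some
-- position of the text one of the literal alternatives starts there; ported exactly as that scan
-- (text.startswith(k, i) with 0 ≤ i is k.toList being a prefix of text.toList.drop i).
def patternSearch (text : String) : Bool :=
  (PySem.List.pyRange 0 (PySem.Str.len text + 1) 1).any (fun i =>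
    driverKeywords.any (fun k => PySem.Chars.startswith (text.toList.drop i.toNat) k.toList))

def filter_driver_license_alt (jobs : List (List (String × String))) : List (List (String × String)) :=
  jobs.filter (fun job =>
    let d := PySem.Dict.mk job
    !(patternSearch (PySem.Str.lower (PySem.Dict.getD d "pozice" (PySem.Dict.getD d "title" ""))) ||
      patternSearch (PySem.Str.lower (PySem.Dict.getD d "popis" (PySem.Dict.getD d "description" "")))))

-- ===== PRECONDITION & SPEC =====
def Spec_filter_driver_license (jobs : List (List (String × String))) (out : List (List (String × String))) : Prop := out = filter_driver_license_alt jobs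
instance (jobs : List (List (String × String))) (out : List (List (String × String))) : Decidable (Spec_filter_driver_license jobs out) := by unfold Spec_filter_driver_license; infer_instance

-- ===== CLAIM =====
def Claim_equal_filter_driver_license : Prop := ∀ (jobs : List (List (String × String))), Dom_filter_driver_license jobs → Spec_filter_driver_license jobs (filter_driver_license jobs)

-- ===== LEMMAS AND PROOFS =====

-- the regex alternation finds a match iff some keyword occurs as a substring
theorem patternSearch_eq_any_isIn (text : String) :
    patternSearch text = driverKeywords.any (fun k => PySem.Str.isIn k text) := by
  rw [Bool.eq_iff_iff]
  simp only [patternSearch, List.any_eq_true]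
  constructor
  · rintro ⟨i, hi, k, hk, hpre⟩
    refine ⟨k, hk, ?_⟩
    rw [PySem.Str.isIn_eq, ← PySem.Chars.exists_prefix_drop_iff_isIn]
    exact ⟨i.toNat, (PySem.Chars.startswith_iff _ _).mp hpre⟩
  · rintro ⟨k, hk, hin⟩
    rw [PySem.Str.isIn_eq, ← PySem.Chars.exists_prefix_drop_iff_isIn] at hin
    obtain ⟨j, hj⟩ := hin
    refine ⟨((min j text.toList.length : Nat) : Int), ?_, k, hk, ?_⟩
    · rw [PySem.List.mem_pyRange_one]
      simp only [PySem.Str.len_eq]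
      omega
    · rw [PySem.Chars.startswith_iff, Int.toNat_natCast]
      rcases le_or_gt j text.toList.length with h | h
      · rwa [Nat.min_eq_left h]
      · have hd : text.toList.drop j = [] := List.drop_eq_nil_of_le (by omega)
        have hk0 : k.toList = [] := List.prefix_nil.mp (hd ▸ hj)
        simp [hk0]

theorem foldl_or_eq_any {α : Type} (l : List α) (p : α → Bool) (b : Bool) :
    l.foldl (fun h x => h || p x) b = (b || l.any p) := by
  induction l generalizing b with
  | nil => simp
  | cons x t ih => simp [List.foldl_cons, ih, Bool.or_assoc]

-- keepA job: the per-job decision A's loop body makes (proof-only abbreviation; zeta-equal to A's body)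
def keepA (job : List (String × String)) : Bool :=
  let d := PySem.Dict.mk job
  let title_lower := PySem.Str.lower (PySem.Dict.getD d "pozice" (PySem.Dict.getD d "title" ""))
  let description_lower := PySem.Str.lower (PySem.Dict.getD d "popis" (PySem.Dict.getD d "description" ""))
  !(driverKeywords.foldl
      (fun has keyword => has || (PySem.Str.isIn keyword title_lower || PySem.Str.isIn keyword description_lower)) false)

-- ===== VERDICT =====
theorem filter_driver_license_spec : Claim_equal_filter_driver_license := by
  intro jobs _
  show filter_driver_license jobs = filter_driver_license_alt jobs
  unfold filter_driver_license
  change jobs.foldl (fun acc job => if keepA job then acc ++ [job] else acc) [] = _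
  rw [PySem.List.foldl_append_if_eq_filter, List.nil_append]
  unfold filter_driver_license_alt
  apply List.filter_congr
  intro job _
  unfold keepA
  simp only [foldl_or_eq_any, Bool.false_or, patternSearch_eq_any_isIn]
  congr 1
  rw [Bool.eq_iff_iff]
  simp only [List.any_eq_true, Bool.or_eq_true]
  constructor
  · rintro ⟨k, hk, h | h⟩
    exacts [Or.inl ⟨k, hk, h⟩, Or.inr ⟨k, hk, h⟩]
  · rintro (⟨k, hk, h⟩ | ⟨k, hk, h⟩)
    exacts [⟨k, hk, Or.inl h⟩, ⟨k, hk, Or.inr h⟩]
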